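-- pv_equiv track=rewrite | github.com/didixuxu/didi-skills | word-proofreader/proofreader.py | _compute_diff_ops
-- ===== SOURCE A (Python) =====
-- import difflib
--
-- def _compute_diff_ops(old_text, new_text):
--     """Compute character-level diff operations between two strings."""
--     matcher = difflib.SequenceMatcher(None, old_text, new_text, autojunk=False)
--     ops = []
--     for op, i1, i2, j1, j2 in matcher.get_opcodes():
--         if op == "equal":
--             ops.append(("equal", old_text[i1:i2]))
--         elif op == "replace":
--             ops.append(("delete", old_text[i1:i2]))
--             ops.append(("insert", new_text[j1:j2]))
--         elif op == "insert":
--             ops.append(("insert", new_text[j1:j2]))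
--         elif op == "delete":
--             ops.append(("delete", old_text[i1:i2]))
--     return ops
-- ===== SOURCE B (Python) =====
-- def _best_match(a, b, alo, ahi, blo, bhi):
--     """Longest block with a[i:i+k] == b[j:j+k] inside the window
--     [alo, ahi) x [blo, bhi); ties broken by smallest i, then smallest j.
--     Backward row DP on prefix-run lengths: run(i, j) = run(i+1, j+1) + 1
--     when a[i] == b[j] (clipped at the window's right edges), else 0."""
--     besti, bestj, bestsize = alo, blo, 0
--     nxt = [0] * (bhi - blo + 1)
--     for i in range(ahi - 1, alo - 1, -1):
--         cur = []
--         for j in range(blo, bhi):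
--             k = nxt[j - blo + 1] + 1 if a[i] == b[j] else 0
--             cur.append(k)
--             if k > bestsize or (k == bestsize and i < besti):
--                 besti, bestj, bestsize = i, j, k
--         cur.append(0)
--         nxt = cur
--     return besti, bestj, bestsize
--
--
-- def _compute_diff_ops(old_text, new_text):
--     """Compute character-level diff operations between two strings."""
--     # In-order divide and conquer around the best match of each window: an
--     # explicit stack interleaves pending windows with finished blocks, so the
--     # blocks come out already sorted and are coalesced as they are appended.
--     blocks = []
--     stack = [(0, len(old_text), 0, len(new_text))]
--     while stack:
--         item = stack.pop()
--         if len(item) == 3: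
--             i, j, k = item
--             if blocks and blocks[-1][0] + blocks[-1][2] == i \
--                     and blocks[-1][1] + blocks[-1][2] == j:
--                 pi, pj, pk = blocks.pop()
--                 blocks.append((pi, pj, pk + k))
--             else:
--                 blocks.append((i, j, k))
--         else:
--             alo, ahi, blo, bhi = item
--             i, j, k = _best_match(old_text, new_text, alo, ahi, blo, bhi)
--             if k:
--                 stack.append((i + k, ahi, j + k, bhi))
--                 stack.append((i, j, k))
--                 stack.append((alo, i, blo, j))
--     blocks.append((len(old_text), len(new_text), 0))
--     ops = []
--     i = j = 0
--     for ai, bj, size in blocks: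
--         if i < ai:
--             ops.append(("delete", old_text[i:ai]))
--         if j < bj:
--             ops.append(("insert", new_text[j:bj]))
--         if size:
--             ops.append(("equal", old_text[ai:ai + size]))
--         i, j = ai + size, bj + size
--     return ops
-- ===== Notes on version B (the rewrite author's own statement) =====
-- stated objective: alternative
-- what changed: B drops difflib and its forward hash-indexed run DP with extension loops, queue, sort and opcode tagging; instead a backward array DP (run(i,j)=run(i+1,j+1)+1) finds each window's best match by an explicit longest/earliest tie-break, an in-order stack traversal emits the blocks already sorted with inline coalescing, and ops are read off the gaps directly.
import Mathlib
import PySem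

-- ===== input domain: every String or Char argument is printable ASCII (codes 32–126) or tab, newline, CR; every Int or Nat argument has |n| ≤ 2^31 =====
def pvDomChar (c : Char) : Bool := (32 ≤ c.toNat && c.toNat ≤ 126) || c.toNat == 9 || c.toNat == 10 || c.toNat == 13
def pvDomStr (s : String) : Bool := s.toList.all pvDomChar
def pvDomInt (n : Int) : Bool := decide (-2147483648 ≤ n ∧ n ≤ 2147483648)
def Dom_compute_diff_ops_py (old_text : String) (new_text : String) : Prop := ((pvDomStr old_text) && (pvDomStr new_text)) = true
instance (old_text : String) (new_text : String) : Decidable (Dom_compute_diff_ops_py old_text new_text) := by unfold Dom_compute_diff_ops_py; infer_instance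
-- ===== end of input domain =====

-- B replaces difflib's matcher wholesale: a backward array DP with an explicit longest/earliest
-- tie-break finds each window's best match, an in-order stack traversal emits the blocks already
-- sorted (no sort, no opcode tagging) with inline coalescing — an alternative of similar cost.

-- ===== PORT A =====  (difflib.SequenceMatcher(None, a, b, autojunk=False) as A invokes it)

-- Python s[a:b] for chars (exact for all Int bounds via PySem.List.slice)
def pvSlice (s : List Char) (a b : Int) : String :=
  String.ofList (PySem.List.slice s (some a) (some b))

-- __chain_b: b2j[c] = ascending list of indices of c in b (setdefault/append loop;
-- insert-with-appended-list has the same lookups as the in-place append)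
def pvB2J (b : List Char) : PySem.Dict Char (List Int) :=
  (PySem.List.enumerate b 0).foldl
    (fun d p => d.insert p.2 (d.getD p.2 [] ++ [p.1])) PySem.Dict.empty

-- inner loop of find_longest_match: 'for j in b2j.get(a[i], []): …' with continue/break
def pvInnerJ (blo bhi : Int) (i : Int) (j2len : PySem.Dict Int Int) :
    List Int → PySem.Dict Int Int → Int × Int × Int → PySem.Dict Int Int × (Int × Int × Int)
  | [], newj2len, best => (newj2len, best)
  | j :: js, newj2len, best =>
      if j < blo then pvInnerJ blo bhi i j2len js newj2len best          -- continue
      else if bhi ≤ j then (newj2len, best)                              -- break (j >= bhi)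
      else
        let k := j2len.getD (j - 1) 0 + 1
        let best' := if best.2.2 < k then (i - k + 1, j - k + 1, k) else best
        pvInnerJ blo bhi i j2len js (newj2len.insert j k) best'

-- backward extension: while besti > alo and bestj > blo and a[besti-1] == b[bestj-1]
-- (bjunk is empty under isjunk=None, autojunk=False, so its two junk loops are literally dead)
def pvExtLo (a b : List Char) (alo blo : Int) (besti bestj bestsize : Int) : Int × Int × Int :=
  if h : alo < besti ∧ blo < bestj ∧
      PySem.List.pyGetD a (besti - 1) ' ' = PySem.List.pyGetD b (bestj - 1) ' ' then
    pvExtLo a b alo blo (besti - 1) (bestj - 1) (bestsize + 1)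
  else (besti, bestj, bestsize)
termination_by (besti - alo).toNat
decreasing_by omega

-- forward extension: while besti+bestsize < ahi and bestj+bestsize < bhi and a[..] == b[..]
def pvExtHi (a b : List Char) (ahi bhi : Int) (besti bestj bestsize : Int) : Int × Int × Int :=
  if h : besti + bestsize < ahi ∧ bestj + bestsize < bhi ∧
      PySem.List.pyGetD a (besti + bestsize) ' ' = PySem.List.pyGetD b (bestj + bestsize) ' ' then
    pvExtHi a b ahi bhi besti bestj (bestsize + 1)
  else (besti, bestj, bestsize)
termination_by (ahi - besti - bestsize).toNat
decreasing_by omega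

-- find_longest_match(alo, ahi, blo, bhi)
def pvFLM (a b : List Char) (b2j : PySem.Dict Char (List Int)) (alo ahi blo bhi : Int) :
    Int × Int × Int :=
  let st := (PySem.List.pyRange alo ahi 1).foldl
    (fun (st : PySem.Dict Int Int × (Int × Int × Int)) i =>
      pvInnerJ blo bhi i st.1 (b2j.getD (PySem.List.pyGetD a i ' ') []) PySem.Dict.empty st.2)
    (PySem.Dict.empty, (alo, blo, 0))
  let r := pvExtLo a b alo blo st.2.1 st.2.2.1 st.2.2.2
  pvExtHi a b ahi bhi r.1 r.2.1 r.2.2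

-- get_matching_blocks queue loop; stack head = Python's list end (queue.pop()); Python appends
-- the low then the high sub-interval, so the high one is pushed on top. fuel bounds the pop
-- count: a totality guard only, never exhausted (proved below).
def pvQueueLoop (a b : List Char) (b2j : PySem.Dict Char (List Int)) :
    Nat → List (Int × Int × Int × Int) → List (Int × Int × Int) → List (Int × Int × Int)
  | 0, _, acc => acc
  | _ + 1, [], acc => acc
  | fuel + 1, (alo, ahi, blo, bhi) :: rest, acc =>
      let r := pvFLM a b b2j alo ahi blo bhi
      let i := r.1; let j := r.2.1; let k := r.2.2
      if k ≠ 0 then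
        let hi := if i + k < ahi ∧ j + k < bhi then [(i + k, ahi, j + k, bhi)] else []
        let lo := if alo < i ∧ blo < j then [(alo, i, blo, j)] else []
        pvQueueLoop a b b2j fuel (hi ++ lo ++ rest) (acc ++ [(i, j, k)])
      else pvQueueLoop a b b2j fuel rest acc

-- second half of get_matching_blocks: collapse adjacent blocks (i1 j1 k1 = running block)
def pvMergeBlocks : List (Int × Int × Int) → Int → Int → Int → List (Int × Int × Int)
  | [], i1, j1, k1 => if k1 ≠ 0 then [(i1, j1, k1)] else []
  | (i2, j2, k2) :: rest, i1, j1, k1 =>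
      if i1 + k1 = i2 ∧ j1 + k1 = j2 then pvMergeBlocks rest i1 j1 (k1 + k2)
      else (if k1 ≠ 0 then [(i1, j1, k1)] else []) ++ pvMergeBlocks rest i2 j2 k2

-- matching_blocks.sort(): Python tuple comparison = lexicographic ordering of the Int triple
def pvBlockKey (t : Int × Int × Int) : Int ×ₗ (Int ×ₗ Int) := toLex (t.1, toLex (t.2.1, t.2.2))

def pvMatchingBlocks (a b : List Char) : List (Int × Int × Int) :=
  let b2j := pvB2J b
  let raw := pvQueueLoop a b b2j (3 * (a.length + b.length) + 1)
    [(0, (a.length : Int), 0, (b.length : Int))] []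
  pvMergeBlocks (PySem.List.sorted raw pvBlockKey false) 0 0 0
    ++ [((a.length : Int), (b.length : Int), 0)]

-- get_opcodes(): tag each gap, then _compute_diff_ops's dispatch on the tag string
def pvOpcodes : List (Int × Int × Int) → Int → Int → List (String × Int × Int × Int × Int)
  | [], _, _ => []
  | (ai, bj, size) :: rest, i, j =>
      let tag : String :=
        if i < ai ∧ j < bj then "replace"
        else if i < ai then "delete"
        else if j < bj then "insert"
        else ""
      (if tag ≠ "" then [(tag, i, ai, j, bj)] else [])
        ++ (if size ≠ 0 then [("equal", ai, ai + size, bj, bj + size)] else [])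
        ++ pvOpcodes rest (ai + size) (bj + size)

def pvOpsA (o n : List Char) : List (String × Int × Int × Int × Int) → List (String × String)
  | [] => []
  | (op, i1, i2, j1, j2) :: rest =>
      (if op = "equal" then [("equal", pvSlice o i1 i2)]
       else if op = "replace" then [("delete", pvSlice o i1 i2), ("insert", pvSlice n j1 j2)]
       else if op = "insert" then [("insert", pvSlice n j1 j2)]
       else if op = "delete" then [("delete", pvSlice o i1 i2)]
       else []) ++ pvOpsA o n rest

def compute_diff_ops_py (old_text : String) (new_text : String) : List (String × String) :=
  pvOpsA old_text.toList new_text.toList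
    (pvOpcodes (pvMatchingBlocks old_text.toList new_text.toList) 0 0)

-- ===== PORT B =====  (Source B: backward array DP + in-order stack traversal, no sort)

-- _best_match: outer loop for i in range(ahi-1, alo-1, -1); inner loop for j in range(blo, bhi)
-- building cur by appends and updating (besti, bestj, bestsize)
def pvBestMatch (a b : List Char) (alo ahi blo bhi : Int) : Int × Int × Int :=
  ((PySem.List.pyRange (ahi - 1) (alo - 1) (-1)).foldl
    (fun (st : List Int × (Int × Int × Int)) i =>
      let row := (PySem.List.pyRange blo bhi 1).foldl
        (fun (rs : List Int × (Int × Int × Int)) j =>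
          let k : Int :=
            if PySem.List.pyGetD a i ' ' = PySem.List.pyGetD b j ' '
            then PySem.List.pyGetD st.1 (j - blo + 1) 0 + 1 else 0
          let best := if rs.2.2.2 < k ∨ (k = rs.2.2.2 ∧ i < rs.2.1) then (i, j, k) else rs.2
          (rs.1 ++ [k], best))
        (([] : List Int), st.2)
      (row.1 ++ [0], row.2))
    (List.replicate (bhi - blo + 1).toNat (0 : Int), (alo, blo, 0))).2

-- the stack mixes pending windows (inr) with finished blocks (inl), exactly like Source B's tuples
-- of length 4 and 3; blocks accumulator kept reversed (Python appends/pops at the list's end).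
def pvCoalesce (blocksRev : List (Int × Int × Int)) (t : Int × Int × Int) :
    List (Int × Int × Int) :=
  match blocksRev with
  | (pi, pj, pk) :: tl =>
      if pi + pk = t.1 ∧ pj + pk = t.2.1 then (pi, pj, pk + t.2.2) :: tl
      else t :: (pi, pj, pk) :: tl
  | [] => [t]

-- fuel is a totality guard only, never exhausted (proved below)
def pvStackLoop (a b : List Char) :
    Nat → List ((Int × Int × Int) ⊕ (Int × Int × Int × Int)) → List (Int × Int × Int) →
    List (Int × Int × Int)
  | 0, _, blocksRev => blocksRev
  | _ + 1, [], blocksRev => blocksRev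
  | fuel + 1, Sum.inl t :: rest, blocksRev =>
      pvStackLoop a b fuel rest (pvCoalesce blocksRev t)
  | fuel + 1, Sum.inr (alo, ahi, blo, bhi) :: rest, blocksRev =>
      let r := pvBestMatch a b alo ahi blo bhi
      if r.2.2 ≠ 0 then
        pvStackLoop a b fuel
          (Sum.inr (alo, r.1, blo, r.2.1) :: Sum.inl r ::
            Sum.inr (r.1 + r.2.2, ahi, r.2.1 + r.2.2, bhi) :: rest) blocksRev
      else pvStackLoop a b fuel rest blocksRev

-- final loop of Source B: read the ops off the gaps between consecutive blocks
def pvOpsB (o n : List Char) : List (Int × Int × Int) → Int → Int → List (String × String)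
  | [], _, _ => []
  | (ai, bj, size) :: rest, i, j =>
      (if i < ai then [("delete", pvSlice o i ai)] else [])
        ++ (if j < bj then [("insert", pvSlice n j bj)] else [])
        ++ (if size ≠ 0 then [("equal", pvSlice o ai (ai + size))] else [])
        ++ pvOpsB o n rest (ai + size) (bj + size)

def compute_diff_ops_py_alt (old_text : String) (new_text : String) : List (String × String) :=
  let o := old_text.toList
  let n := new_text.toList
  let blocks :=
    (pvStackLoop o n (3 * (o.length + n.length) + 1)
      [Sum.inr (0, (o.length : Int), 0, (n.length : Int))] []).reverse
      ++ [((o.length : Int), (n.length : Int), 0)]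
  pvOpsB o n blocks 0 0

-- ===== PRECONDITION & SPEC =====
def Spec_compute_diff_ops_py (old_text : String) (new_text : String) (out : List (String × String)) : Prop := out = compute_diff_ops_py_alt old_text new_text
instance (old_text : String) (new_text : String) (out : List (String × String)) : Decidable (Spec_compute_diff_ops_py old_text new_text out) := by unfold Spec_compute_diff_ops_py; infer_instance

-- ===== CLAIM (what is proved, stated in full; the proofs are below) =====
def Claim_equal_compute_diff_ops_py : Prop := ∀ (old_text : String) (new_text : String), Dom_compute_diff_ops_py old_text new_text → Spec_compute_diff_ops_py old_text new_text (compute_diff_ops_py old_text new_text)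

-- ===== LEMMAS AND PROOFS =====

-- ---------- common vocabulary: padded char read, clipped run lengths, best-match spec ----------

-- the character read both ports perform (out-of-range reads never influence results below)
def pvCh (s : List Char) (i : Int) : Char := PySem.List.pyGetD s i ' '

-- length of the common run ENDING at (r, c), clipped at the window's left edges alo, blo
-- (the quantity difflib's forward j2len DP tabulates)
def pvRE (a b : List Char) (alo blo : Int) (r c : Int) : Int :=
  if pvCh a r = pvCh b c then
    (if h : alo < r ∧ blo < c then pvRE a b alo blo (r - 1) (c - 1) else 0) + 1
  else 0
termination_by (r - alo).toNat
decreasing_by omega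

-- length of the common run STARTING at (i, j), clipped at the window's right edges ahi, bhi
-- (the quantity Source B's backward row DP tabulates)
def pvPE (a b : List Char) (ahi bhi : Int) (i j : Int) : Int :=
  if pvCh a i = pvCh b j then
    (if h : i + 1 < ahi ∧ j + 1 < bhi then pvPE a b ahi bhi (i + 1) (j + 1) else 0) + 1
  else 0
termination_by (ahi - i).toNat
decreasing_by omega

-- a matching block of positive size lying inside the window
def pvGood (a b : List Char) (alo ahi blo bhi i j k : Int) : Prop :=
  alo ≤ i ∧ blo ≤ j ∧ i + k ≤ ahi ∧ j + k ≤ bhi ∧ 1 ≤ k ∧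
  ∀ t : Int, 0 ≤ t → t < k → pvCh a (i + t) = pvCh b (j + t)

-- difflib's documented find_longest_match contract (isjunk=None): longest block,
-- ties to the smallest i, then the smallest j; (alo, blo, 0) when nothing matches
def pvIsBest (a b : List Char) (alo ahi blo bhi : Int) (r : Int × Int × Int) : Prop :=
  (r = (alo, blo, 0) ∧ ∀ i j k, ¬ pvGood a b alo ahi blo bhi i j k) ∨
  (pvGood a b alo ahi blo bhi r.1 r.2.1 r.2.2 ∧
   ∀ i j k, pvGood a b alo ahi blo bhi i j k →
     k < r.2.2 ∨ (k = r.2.2 ∧ (r.1 < i ∨ (r.1 = i ∧ r.2.1 ≤ j))))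

theorem pvIsBest_unique (a b : List Char) (alo ahi blo bhi : Int) (r s : Int × Int × Int)
    (h1 : pvIsBest a b alo ahi blo bhi r) (h2 : pvIsBest a b alo ahi blo bhi s) : r = s := by
  obtain ⟨r1, r2, r3⟩ := r
  obtain ⟨s1, s2, s3⟩ := s
  rcases h1 with ⟨hr, hno⟩ | ⟨hg, hmax⟩ <;> rcases h2 with ⟨hs, hno'⟩ | ⟨hg', hmax'⟩
  · rw [hr, hs]
  · exact absurd hg' (hno _ _ _)
  · exact absurd hg (hno' _ _ _)
  · have a1 := hmax _ _ _ hg'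
    have a2 := hmax' _ _ _ hg
    simp only [Prod.mk.injEq]
    dsimp only at a1 a2 hg hg'
    omega

theorem pvRE_nonneg (a b : List Char) (alo blo r c : Int) : 0 ≤ pvRE a b alo blo r c := by
  fun_induction pvRE <;> (try split) <;> omega

theorem pvRE_pos (a b : List Char) (alo blo r c : Int) (h : pvCh a r = pvCh b c) :
    1 ≤ pvRE a b alo blo r c := by
  rw [pvRE, if_pos h]
  split
  · have := pvRE_nonneg a b alo blo (r - 1) (c - 1); omega
  · omega

theorem pvPE_nonneg (a b : List Char) (ahi bhi i j : Int) : 0 ≤ pvPE a b ahi bhi i j := by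
  fun_induction pvPE <;> (try split) <;> omega

theorem pvPE_pos (a b : List Char) (ahi bhi i j : Int) (h : pvCh a i = pvCh b j) :
    1 ≤ pvPE a b ahi bhi i j := by
  rw [pvPE, if_pos h]
  split
  · have := pvPE_nonneg a b ahi bhi (i + 1) (j + 1); omega
  · omega

theorem pvRE_eq_zero (a b : List Char) (alo blo r c : Int) (h : pvCh a r ≠ pvCh b c) :
    pvRE a b alo blo r c = 0 := by
  rw [pvRE, if_neg h]

theorem pvPE_eq_zero (a b : List Char) (ahi bhi i j : Int) (h : pvCh a i ≠ pvCh b j) :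
    pvPE a b ahi bhi i j = 0 := by
  rw [pvPE, if_neg h]

-- what a positive pvRE value certifies: a block of that size ending at (r, c) inside the window
theorem pvRE_spec (a b : List Char) (alo blo : Int) :
    ∀ n : Nat, ∀ r c : Int, (r - alo).toNat = n → alo ≤ r → blo ≤ c →
      pvCh a r = pvCh b c →
      alo ≤ r - pvRE a b alo blo r c + 1 ∧ blo ≤ c - pvRE a b alo blo r c + 1 ∧
      (∀ t : Int, 0 ≤ t → t < pvRE a b alo blo r c → pvCh a (r - t) = pvCh b (c - t)) := by
  intro n
  induction n using Nat.strong_induction_on with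
  | h n ih =>
    intro r c hn hr hc hch
    rw [pvRE, if_pos hch]
    by_cases h : alo < r ∧ blo < c
    · rw [dif_pos h]
      by_cases hch' : pvCh a (r - 1) = pvCh b (c - 1)
      · have hrec := ih (r - 1 - alo).toNat (by omega) (r - 1) (c - 1) rfl (by omega) (by omega) hch'
        refine ⟨by omega, by omega, ?_⟩
        intro t ht0 htv
        rcases eq_or_lt_of_le ht0 with he | hpos
        · simpa [← he] using hch
        · have := hrec.2.2 (t - 1) (by omega) (by omega)
          have e1 : r - 1 - (t - 1) = r - t := by ring
          have e2 : c - 1 - (t - 1) = c - t := by ring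
          rwa [e1, e2] at this
      · rw [pvRE_eq_zero a b alo blo _ _ hch']
        refine ⟨by omega, by omega, ?_⟩
        intro t ht0 htv
        have : t = 0 := by omega
        simpa [this] using hch
    · rw [dif_neg h]
      refine ⟨by omega, by omega, ?_⟩
      intro t ht0 htv
      have : t = 0 := by omega
      simpa [this] using hch

-- every good block pushes the run ending at its last cell at least to its own size
theorem pvGood_le_re (a b : List Char) (alo blo : Int) :
    ∀ n : Nat, ∀ i j : Int, alo ≤ i → blo ≤ j →
      (∀ t : Int, 0 ≤ t → t ≤ (n : Int) → pvCh a (i + t) = pvCh b (j + t)) →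
      ((n : Int) + 1) ≤ pvRE a b alo blo (i + n) (j + n) := by
  intro n
  induction n with
  | zero =>
    intro i j hi hj hch
    have := pvRE_pos a b alo blo i j (by simpa using hch 0 le_rfl (by omega))
    simpa using this
  | succ n ih =>
    intro i j hi hj hch
    have hch' : pvCh a (i + (n + 1 : Nat)) = pvCh b (j + (n + 1 : Nat)) := by
      have := hch ((n : Int) + 1) (by omega) (by push_cast; omega)
      push_cast
      push_cast at this
      convert this using 2
    rw [pvRE, if_pos hch']
    have hcond : alo < i + (n + 1 : Nat) ∧ blo < j + (n + 1 : Nat) := by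
      constructor <;> (push_cast; omega)
    rw [dif_pos hcond]
    have hrec := ih i j hi hj (fun t ht0 htn => hch t ht0 (by push_cast; omega))
    have e1 : i + ((n : Nat) + 1 : Nat) - 1 = i + (n : Nat) := by push_cast; ring
    have e2 : j + ((n : Nat) + 1 : Nat) - 1 = j + (n : Nat) := by push_cast; ring
    rw [e1, e2]
    push_cast
    push_cast at hrec
    omega

-- mirrored facts for the prefix-run table
theorem pvPE_spec (a b : List Char) (ahi bhi : Int) :
    ∀ n : Nat, ∀ i j : Int, (ahi - i).toNat = n → i < ahi → j < bhi →
      pvCh a i = pvCh b j →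
      i + pvPE a b ahi bhi i j ≤ ahi ∧ j + pvPE a b ahi bhi i j ≤ bhi ∧
      (∀ t : Int, 0 ≤ t → t < pvPE a b ahi bhi i j → pvCh a (i + t) = pvCh b (j + t)) := by
  intro n
  induction n using Nat.strong_induction_on with
  | h n ih =>
    intro i j hn hi hj hch
    rw [pvPE, if_pos hch]
    by_cases h : i + 1 < ahi ∧ j + 1 < bhi
    · rw [dif_pos h]
      by_cases hch' : pvCh a (i + 1) = pvCh b (j + 1)
      · have hrec := ih (ahi - (i + 1)).toNat (by omega) (i + 1) (j + 1) rfl (by omega) (by omega) hch'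
        refine ⟨by omega, by omega, ?_⟩
        intro t ht0 htv
        rcases eq_or_lt_of_le ht0 with he | hpos
        · simpa [← he] using hch
        · have := hrec.2.2 (t - 1) (by omega) (by omega)
          have e1 : i + 1 + (t - 1) = i + t := by ring
          have e2 : j + 1 + (t - 1) = j + t := by ring
          rwa [e1, e2] at this
      · rw [pvPE_eq_zero a b ahi bhi _ _ hch']
        refine ⟨by omega, by omega, ?_⟩
        intro t ht0 htv
        have : t = 0 := by omega
        simpa [this] using hch
    · rw [dif_neg h]
      refine ⟨by omega, by omega, ?_⟩
      intro t ht0 htv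
      have : t = 0 := by omega
      simpa [this] using hch

theorem pvGood_le_pe (a b : List Char) (ahi bhi : Int) :
    ∀ n : Nat, ∀ i j : Int, i + (n : Int) < ahi → j + (n : Int) < bhi →
      (∀ t : Int, 0 ≤ t → t ≤ (n : Int) → pvCh a (i + t) = pvCh b (j + t)) →
      ((n : Int) + 1) ≤ pvPE a b ahi bhi i j := by
  intro n
  induction n with
  | zero =>
    intro i j hi hj hch
    have := pvPE_pos a b ahi bhi i j (by simpa using hch 0 le_rfl (by omega))
    simpa using this
  | succ n ih =>
    intro i j hi hj hch
    have hch0 : pvCh a i = pvCh b j := by simpa using hch 0 le_rfl (by push_cast; omega)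
    rw [pvPE, if_pos hch0]
    have hcond : i + 1 < ahi ∧ j + 1 < bhi := by constructor <;> (push_cast at hi hj; omega)
    rw [dif_pos hcond]
    have hrec := ih (i + 1) (j + 1) (by push_cast at hi ⊢; omega) (by push_cast at hj ⊢; omega)
      (fun t ht0 htn => by
        have := hch (t + 1) (by omega) (by push_cast; omega)
        have e1 : i + (t + 1) = i + 1 + t := by ring
        have e2 : j + (t + 1) = j + 1 + t := by ring
        rwa [e1, e2] at this)
    push_cast
    push_cast at hrec
    omega
-- ---------- B side: the backward row DP satisfies the best-match contract ----------

theorem pvPyGetD_nonneg {α : Type} [Inhabited α] (xs : List α) (d : α) (m : Int) (hm : 0 ≤ m) :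
    PySem.List.pyGetD xs m d = xs.getD m.toNat d := by
  have := PySem.List.pyGetD_natCast xs m.toNat d
  rwa [Int.toNat_of_nonneg hm] at this

-- best-so-far over a processed region P, by Source B's update rule
def pvInvB (a b : List Char) (ahi bhi alo blo : Int) (P : Int → Int → Prop)
    (best : Int × Int × Int) : Prop :=
  (best = (alo, blo, 0) ∧ ∀ r c, P r c → pvCh a r ≠ pvCh b c) ∨
  (∃ r c, P r c ∧ pvCh a r = pvCh b c ∧ best = (r, c, pvPE a b ahi bhi r c) ∧
    ∀ r' c', P r' c' → pvCh a r' = pvCh b c' →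
      pvPE a b ahi bhi r' c' < pvPE a b ahi bhi r c ∨
      (pvPE a b ahi bhi r' c' = pvPE a b ahi bhi r c ∧ (r < r' ∨ (r = r' ∧ c ≤ c'))))

theorem pvInvB_congr (a b : List Char) (ahi bhi alo blo : Int) (P Q : Int → Int → Prop)
    (h : ∀ r c, P r c ↔ Q r c) (hb : pvInvB a b ahi bhi alo blo P best) :
    pvInvB a b ahi bhi alo blo Q best := by
  rcases hb with ⟨he, hno⟩ | ⟨r, c, hP, hch, hbe, hall⟩
  · exact Or.inl ⟨he, fun r c hq => hno r c ((h r c).mpr hq)⟩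
  · exact Or.inr ⟨r, c, (h r c).mp hP, hch, hbe,
      fun r' c' hq hch' => hall r' c' ((h r' c').mpr hq) hch'⟩

theorem pvInvB_step (a b : List Char) (ahi bhi alo blo : Int) (P : Int → Int → Prop)
    (best : Int × Int × Int) (r0 c0 v0 : Int)
    (hbest : pvInvB a b ahi bhi alo blo P best)
    (hv : v0 = if pvCh a r0 = pvCh b c0 then pvPE a b ahi bhi r0 c0 else 0)
    (hr0 : alo ≤ r0)
    (hord : ∀ r c, P r c → r0 < r ∨ (r0 = r ∧ c < c0)) :
    pvInvB a b ahi bhi alo blo (fun r c => P r c ∨ (r = r0 ∧ c = c0))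
      (if best.2.2 < v0 ∨ (v0 = best.2.2 ∧ r0 < best.1) then (r0, c0, v0) else best) := by
  by_cases hch : pvCh a r0 = pvCh b c0
  · rw [if_pos hch] at hv
    have hpos : 1 ≤ v0 := hv ▸ pvPE_pos a b ahi bhi r0 c0 hch
    rcases hbest with ⟨he, hno⟩ | ⟨r, c, hP, hch2, hbe, hall⟩
    · rw [he]
      rw [if_pos (by simp; omega)]
      refine Or.inr ⟨r0, c0, Or.inr ⟨rfl, rfl⟩, hch, by rw [hv], ?_⟩
      rintro r' c' (hq | ⟨rfl, rfl⟩) hch'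
      · exact absurd hch' (hno r' c' hq)
      · exact Or.inr ⟨rfl, Or.inr ⟨rfl, le_rfl⟩⟩
    · rw [hbe]
      dsimp only
      by_cases hup : pvPE a b ahi bhi r c < v0 ∨ (v0 = pvPE a b ahi bhi r c ∧ r0 < r)
      · rw [if_pos hup]
        refine Or.inr ⟨r0, c0, Or.inr ⟨rfl, rfl⟩, hch, by rw [hv], ?_⟩
        rintro r' c' (hq | ⟨rfl, rfl⟩) hch'
        · have := hall r' c' hq hch'
          rw [← hv]
          rcases hup with hlt | ⟨hveq, hrlt⟩
          · left; omega
          · rcases this with hlt' | ⟨heq', hlex⟩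
            · left; omega
            · right; exact ⟨by omega, by omega⟩
        · exact Or.inr ⟨rfl, Or.inr ⟨rfl, le_rfl⟩⟩
      · rw [if_neg hup]
        refine Or.inr ⟨r, c, Or.inl hP, hch2, rfl, ?_⟩
        rintro r' c' (hq | ⟨rfl, rfl⟩) hch'
        · exact hall r' c' hq hch'
        · rw [← hv]
          simp only [not_or, not_lt, not_and] at hup
          rcases lt_or_eq_of_le hup.1 with hlt | heq
          · exact Or.inl hlt
          · have hnr := hup.2 heq
            have hoc := hord r c hP
            exact Or.inr ⟨heq, by omega⟩
  · rw [if_neg hch] at hv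
    subst hv
    have hnup : ¬ (best.2.2 < 0 ∨ ((0 : Int) = best.2.2 ∧ r0 < best.1)) := by
      rcases hbest with ⟨he, _⟩ | ⟨r, c, hP, hch2, hbe, _⟩
      · rw [he]; simp; omega
      · have := pvPE_pos a b ahi bhi r c hch2
        rw [hbe]; simp; omega
    rw [if_neg hnup]
    rcases hbest with ⟨he, hno⟩ | ⟨r, c, hP, hch2, hbe, hall⟩
    · refine Or.inl ⟨he, ?_⟩
      rintro r' c' (hq | ⟨rfl, rfl⟩)
      · exact hno r' c' hq
      · exact hch
    · refine Or.inr ⟨r, c, Or.inl hP, hch2, hbe, ?_⟩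
      rintro r' c' (hq | ⟨rfl, rfl⟩) hch'
      · exact hall r' c' hq hch'
      · exact absurd hch' hch

theorem pvInvB_row (a b : List Char) (ahi bhi alo blo : Int) (i : Int) (v : Int → Int)
    (hai : alo ≤ i)
    (hv : ∀ j, blo ≤ j → j < bhi → v j = if pvCh a i = pvCh b j then pvPE a b ahi bhi i j else 0) :
    ∀ (cols : List Int), cols.Pairwise (· < ·) → (∀ j ∈ cols, blo ≤ j ∧ j < bhi) →
    ∀ (P : Int → Int → Prop) (best : Int × Int × Int),
      pvInvB a b ahi bhi alo blo P best →
      (∀ r c, P r c → ∀ j0 ∈ cols, i < r ∨ (i = r ∧ c < j0)) →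
      pvInvB a b ahi bhi alo blo (fun r c => P r c ∨ (r = i ∧ c ∈ cols))
        (cols.foldl
          (fun best j =>
            if best.2.2 < v j ∨ (v j = best.2.2 ∧ i < best.1) then (i, j, v j) else best)
          best) := by
  intro cols
  induction cols with
  | nil =>
    intro _ _ P best hb _
    exact pvInvB_congr a b ahi bhi alo blo P _ (by simp) hb
  | cons j js ih =>
    intro hpair hsub P best hb hord
    simp only [List.foldl_cons]
    have hstep := pvInvB_step a b ahi bhi alo blo P best i j (v j) hb
      (hv j (hsub j (by simp)).1 (hsub j (by simp)).2) hai
      (fun r c hP => hord r c hP j (by simp))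
    have hrec := ih (List.Pairwise.of_cons hpair)
      (fun j' hj' => hsub j' (by simp [hj']))
      (fun r c => P r c ∨ (r = i ∧ c = j)) _ hstep ?_
    · refine pvInvB_congr a b ahi bhi alo blo _ _ ?_ hrec
      intro r c
      simp only [List.mem_cons]
      tauto
    · rintro r c (hP | ⟨rfl, rfl⟩) j0 hj0
      · exact hord r c hP j0 (by simp [hj0])
      · have := List.rel_of_pairwise_cons hpair hj0
        exact Or.inr ⟨rfl, this⟩
-- the outer fold body of pvBestMatch, named so the loop invariant can speak about it
def pvBMbody (a b : List Char) (blo bhi : Int) (st : List Int × (Int × Int × Int)) (i : Int) :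
    List Int × (Int × Int × Int) :=
  let row := (PySem.List.pyRange blo bhi 1).foldl
    (fun (rs : List Int × (Int × Int × Int)) j =>
      let k : Int :=
        if PySem.List.pyGetD a i ' ' = PySem.List.pyGetD b j ' '
        then PySem.List.pyGetD st.1 (j - blo + 1) 0 + 1 else 0
      let best := if rs.2.2.2 < k ∨ (k = rs.2.2.2 ∧ i < rs.2.1) then (i, j, k) else rs.2
      (rs.1 ++ [k], best))
    (([] : List Int), st.2)
  (row.1 ++ [0], row.2)

theorem pvBestMatch_eq_fold (a b : List Char) (alo ahi blo bhi : Int) :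
    pvBestMatch a b alo ahi blo bhi
      = ((PySem.List.pyRange (ahi - 1) (alo - 1) (-1)).foldl (pvBMbody a b blo bhi)
          (List.replicate (bhi - blo + 1).toNat (0 : Int), (alo, blo, 0))).2 := rfl

-- the list component and the best component of a row evolve independently
theorem pvRowSplit (a b : List Char) (blo : Int) (i : Int) (nxt : List Int) :
    ∀ (js : List Int) (cur : List Int) (best : Int × Int × Int),
      js.foldl (fun (rs : List Int × (Int × Int × Int)) j =>
        let k : Int :=
          if PySem.List.pyGetD a i ' ' = PySem.List.pyGetD b j ' '
          then PySem.List.pyGetD nxt (j - blo + 1) 0 + 1 else 0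
        let best := if rs.2.2.2 < k ∨ (k = rs.2.2.2 ∧ i < rs.2.1) then (i, j, k) else rs.2
        (rs.1 ++ [k], best)) (cur, best)
      = (cur ++ js.map (fun j =>
            if PySem.List.pyGetD a i ' ' = PySem.List.pyGetD b j ' '
            then PySem.List.pyGetD nxt (j - blo + 1) 0 + 1 else 0),
         js.foldl (fun (best : Int × Int × Int) j =>
           let k : Int :=
             if PySem.List.pyGetD a i ' ' = PySem.List.pyGetD b j ' '
             then PySem.List.pyGetD nxt (j - blo + 1) 0 + 1 else 0
           if best.2.2 < k ∨ (k = best.2.2 ∧ i < best.1) then (i, j, k) else best) best) := by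
  intro js
  induction js with
  | nil => intro cur best; simp
  | cons j js ih =>
    intro cur best
    simp only [List.foldl_cons, List.map_cons]
    rw [ih]
    simp [List.append_assoc]

-- the row invariant: nxt holds the prefix-run values of row inext (0 beyond the window)
def pvJB (a b : List Char) (ahi bhi blo : Int) (inext : Int) (nxt : List Int) : Prop :=
  ∀ m : Int, 0 ≤ m → PySem.List.pyGetD nxt m 0 =
    if inext < ahi ∧ blo + m < bhi then pvPE a b ahi bhi inext (blo + m) else 0

theorem pvJB_init (a b : List Char) (ahi bhi blo : Int) (n : Nat) :
    pvJB a b ahi bhi blo ahi (List.replicate n (0 : Int)) := by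
  intro m hm
  rw [pvPyGetD_nonneg _ _ _ hm]
  have : (List.replicate n (0 : Int)).getD m.toNat 0 = 0 := by
    simp [List.getD_eq_getElem?_getD, List.getElem?_replicate]
    split <;> simp
  rw [this]
  rw [if_neg (by omega)]

-- the values fed to the best update in row i are exactly the prefix runs of row i
theorem pvVal_row (a b : List Char) (ahi bhi blo : Int) (i : Int) (nxt : List Int)
    (hJ : pvJB a b ahi bhi blo (i + 1) nxt) (j : Int) (hj1 : blo ≤ j) (_hj2 : j < bhi) :
    (if PySem.List.pyGetD a i ' ' = PySem.List.pyGetD b j ' '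
     then PySem.List.pyGetD nxt (j - blo + 1) 0 + 1 else 0)
    = if pvCh a i = pvCh b j then pvPE a b ahi bhi i j else 0 := by
  show (if pvCh a i = pvCh b j then PySem.List.pyGetD nxt (j - blo + 1) 0 + 1 else 0) = _
  by_cases hch : pvCh a i = pvCh b j
  · rw [if_pos hch, if_pos hch]
    have hJ' := hJ (j - blo + 1) (by omega)
    have e : blo + (j - blo + 1) = j + 1 := by ring
    rw [e] at hJ'
    rw [hJ']
    have hPE : pvPE a b ahi bhi i j
        = (if i + 1 < ahi ∧ j + 1 < bhi then pvPE a b ahi bhi (i + 1) (j + 1) else 0) + 1 := by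
      rw [pvPE, if_pos hch]
      by_cases hc : i + 1 < ahi ∧ j + 1 < bhi
      · rw [if_pos hc, dif_pos hc]
      · rw [if_neg hc, dif_neg hc]
    rw [hPE]
  · rw [if_neg hch, if_neg hch]

-- after processing row i the fresh list satisfies the row invariant for i
theorem pvJB_step (a b : List Char) (ahi bhi blo : Int) (i : Int) (nxt : List Int)
    (hJ : pvJB a b ahi bhi blo (i + 1) nxt) (hi : i < ahi) :
    pvJB a b ahi bhi blo i
      ((PySem.List.pyRange blo bhi 1).map (fun j =>
          if PySem.List.pyGetD a i ' ' = PySem.List.pyGetD b j ' '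
          then PySem.List.pyGetD nxt (j - blo + 1) 0 + 1 else 0) ++ [0]) := by
  intro m hm
  rw [pvPyGetD_nonneg _ _ _ hm]
  have hlen : ((PySem.List.pyRange blo bhi 1).map (fun j =>
      if PySem.List.pyGetD a i ' ' = PySem.List.pyGetD b j ' '
      then PySem.List.pyGetD nxt (j - blo + 1) 0 + 1 else 0)).length = (bhi - blo).toNat := by
    simp [PySem.List.length_pyRange_one]
  by_cases hmb : blo + m < bhi
  · have hmlt : m.toNat < (bhi - blo).toNat := by omega
    rw [List.getD_append _ _ _ _ (by omega), List.getD_eq_getElem _ _ (by omega)]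
    rw [List.getElem_map, PySem.List.getElem_pyRange_one]
    have e : blo + (m.toNat : Int) = blo + m := by omega
    rw [e, pvVal_row a b ahi bhi blo i nxt hJ (blo + m) (by omega) hmb]
    have hone : (if pvCh a i = pvCh b (blo + m) then pvPE a b ahi bhi i (blo + m) else 0)
        = pvPE a b ahi bhi i (blo + m) := by
      by_cases hch : pvCh a i = pvCh b (blo + m)
      · rw [if_pos hch]
      · rw [if_neg hch, pvPE_eq_zero a b ahi bhi i (blo + m) hch]
    rw [hone, if_pos (show i < ahi ∧ blo + m < bhi from ⟨hi, hmb⟩)]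
  · rw [if_neg (by omega)]
    have hge : ((PySem.List.pyRange blo bhi 1).map (fun j =>
        if PySem.List.pyGetD a i ' ' = PySem.List.pyGetD b j ' '
        then PySem.List.pyGetD nxt (j - blo + 1) 0 + 1 else 0)).length ≤ m.toNat := by
      rw [hlen]; omega
    rw [List.getD_append_right _ _ _ _ hge]
    rcases Nat.eq_or_lt_of_le hge with he | hlt
    · rw [← he, Nat.sub_self]; rfl
    · rw [List.getD_eq_default _ _ (by simp only [List.length_cons, List.length_nil]; omega)]

-- processing one row preserves both invariants
theorem pvBM_step (a b : List Char) (ahi bhi alo blo i : Int)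
    (hialo : alo ≤ i) (hiahi : i ≤ ahi - 1)
    (st : List Int × (Int × Int × Int))
    (hJ : pvJB a b ahi bhi blo (i + 1) st.1)
    (hI : pvInvB a b ahi bhi alo blo (fun r c => i < r ∧ r < ahi ∧ blo ≤ c ∧ c < bhi) st.2) :
    pvJB a b ahi bhi blo i (pvBMbody a b blo bhi st i).1 ∧
    pvInvB a b ahi bhi alo blo (fun r c => i - 1 < r ∧ r < ahi ∧ blo ≤ c ∧ c < bhi)
      (pvBMbody a b blo bhi st i).2 := by
  unfold pvBMbody
  rw [pvRowSplit a b blo i st.1]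
  constructor
  · exact pvJB_step a b ahi bhi blo i st.1 hJ (by omega)
  · have hrow := pvInvB_row a b ahi bhi alo blo i
      (fun j => if PySem.List.pyGetD a i ' ' = PySem.List.pyGetD b j ' '
                then PySem.List.pyGetD st.1 (j - blo + 1) 0 + 1 else 0)
      hialo
      (fun j hj1 hj2 => pvVal_row a b ahi bhi blo i st.1 hJ j hj1 hj2)
      (PySem.List.pyRange blo bhi 1)
      (PySem.List.pairwise_lt_pyRange_one blo bhi)
      (fun j hj => (PySem.List.mem_pyRange_one.mp hj))
      _ st.2 hI
      (fun r c hP j0 _ => Or.inl hP.1)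
    refine pvInvB_congr a b ahi bhi alo blo _ _ ?_ hrow
    intro r c
    simp only [PySem.List.mem_pyRange_one]
    omega

-- running the remaining rows hi, hi-1, …, alo establishes the full-window invariant
theorem pvBM_loop (a b : List Char) (ahi bhi alo blo : Int) :
    ∀ (n : Nat) (hi : Int) (st : List Int × (Int × Int × Int)),
      hi = alo - 1 + (n : Int) → hi ≤ ahi - 1 →
      pvJB a b ahi bhi blo (hi + 1) st.1 →
      pvInvB a b ahi bhi alo blo (fun r c => hi < r ∧ r < ahi ∧ blo ≤ c ∧ c < bhi) st.2 →
      pvInvB a b ahi bhi alo blo (fun r c => alo ≤ r ∧ r < ahi ∧ blo ≤ c ∧ c < bhi)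
        (((PySem.List.pyRange hi (alo - 1) (-1)).foldl (pvBMbody a b blo bhi) st).2) := by
  intro n
  induction n with
  | zero =>
    intro hi st he _ _ hI
    rw [PySem.List.pyRange_neg_one_eq_nil (by omega)]
    exact pvInvB_congr a b ahi bhi alo blo _ _ (by intro r c; omega) hI
  | succ n ih =>
    intro hi st he hle hJ hI
    rw [PySem.List.pyRange_neg_one_cons (show alo - 1 < hi by omega)]
    simp only [List.foldl_cons]
    have hstep := pvBM_step a b ahi bhi alo blo hi (by omega) hle st hJ hI
    apply ih (hi - 1) _ (by omega) (by omega) ?_ hstep.2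
    have e : hi - 1 + 1 = hi := by ring
    rw [e]
    exact hstep.1

-- full-window best-so-far gives difflib's find_longest_match contract
theorem pvInvB_to_isBest (a b : List Char) (alo ahi blo bhi : Int) (best : Int × Int × Int)
    (h : pvInvB a b ahi bhi alo blo (fun r c => alo ≤ r ∧ r < ahi ∧ blo ≤ c ∧ c < bhi) best) :
    pvIsBest a b alo ahi blo bhi best := by
  have hGle : ∀ i j k : Int, pvGood a b alo ahi blo bhi i j k → k ≤ pvPE a b ahi bhi i j := by
    intro i j k hg
    obtain ⟨h1, h2, h3, h4, h5, hch⟩ := hg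
    have hcast : ((k - 1).toNat : Int) = k - 1 := by omega
    have := pvGood_le_pe a b ahi bhi (k - 1).toNat i j (by omega) (by omega)
      (fun t ht0 htn => hch t ht0 (by omega))
    omega
  rcases h with ⟨he, hno⟩ | ⟨r, c, hP, hch, hbe, hall⟩
  · refine Or.inl ⟨he, ?_⟩
    intro i j k hg
    obtain ⟨h1, h2, h3, h4, h5, hchs⟩ := hg
    have hch0 := hchs 0 le_rfl (by omega)
    simp only [add_zero] at hch0
    exact hno i j ⟨h1, by omega, h2, by omega⟩ hch0
  · have hspec := pvPE_spec a b ahi bhi (ahi - r).toNat r c rfl (by omega) (by omega) hch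
    refine Or.inr ⟨?_, ?_⟩
    · rw [hbe]
      refine ⟨hP.1, hP.2.2.1, hspec.1, hspec.2.1, pvPE_pos a b ahi bhi r c hch, hspec.2.2⟩
    · intro i j k hg
      have hk := hGle i j k hg
      obtain ⟨h1, h2, h3, h4, h5, hchs⟩ := hg
      have hch0 := hchs 0 le_rfl (by omega)
      simp only [add_zero] at hch0
      have := hall i j ⟨h1, by omega, h2, by omega⟩ hch0
      rw [hbe]
      dsimp only
      omega

theorem pvBestMatch_isBest (a b : List Char) (alo ahi blo bhi : Int) :
    pvIsBest a b alo ahi blo bhi (pvBestMatch a b alo ahi blo bhi) := by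
  by_cases hw : alo ≤ ahi - 1
  · rw [pvBestMatch_eq_fold]
    apply pvInvB_to_isBest
    exact pvBM_loop a b ahi bhi alo blo (ahi - 1 - (alo - 1)).toNat (ahi - 1) _
      (by omega) le_rfl
      (by
        have := pvJB_init a b ahi bhi blo (bhi - blo + 1).toNat
        have e : ahi - 1 + 1 = ahi := by ring
        rw [e]
        exact this)
      (Or.inl ⟨rfl, fun r c hP => absurd hP (by omega)⟩)
  · rw [pvBestMatch_eq_fold, PySem.List.pyRange_neg_one_eq_nil (by omega)]
    refine Or.inl ⟨rfl, ?_⟩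
    intro i j k hg
    obtain ⟨h1, h2, h3, h4, h5, _⟩ := hg
    omega
-- ---------- A side: difflib's forward hash-indexed DP satisfies the same contract ----------

theorem pvB2J_foldl (c : Char) :
    ∀ (ps : List (Int × Char)) (d : PySem.Dict Char (List Int)),
      (ps.foldl (fun d p => d.insert p.2 (d.getD p.2 [] ++ [p.1])) d).getD c []
      = d.getD c [] ++ (ps.filter (fun p => p.2 == c)).map (·.1) := by
  intro ps
  induction ps with
  | nil => intro d; simp
  | cons p ps ih =>
    intro d
    simp only [List.foldl_cons]
    rw [ih]
    by_cases hpc : p.2 = c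
    · rw [PySem.Dict.getD_insert]
      simp [hpc]
    · rw [PySem.Dict.getD_insert]
      simp [hpc, Ne.symm hpc]

theorem pvB2J_getD (b : List Char) (c : Char) :
    (pvB2J b).getD c [] = ((PySem.List.enumerate b 0).filter (fun p => p.2 == c)).map (·.1) := by
  unfold pvB2J
  rw [pvB2J_foldl c (PySem.List.enumerate b 0) PySem.Dict.empty]
  rw [PySem.Dict.getD_empty]
  simp

theorem pvCols_mem (b : List Char) (c : Char) (j : Int) :
    j ∈ (pvB2J b).getD c [] ↔ 0 ≤ j ∧ j < (b.length : Int) ∧ pvCh b j = c := by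
  rw [pvB2J_getD]
  simp only [List.mem_map, List.mem_filter, PySem.List.mem_enumerate_iff]
  constructor
  · rintro ⟨p, ⟨⟨k, hk, rfl⟩, hc⟩, rfl⟩
    simp only [beq_iff_eq] at hc
    refine ⟨by omega, by push_cast; omega, ?_⟩
    rw [pvCh, PySem.List.pyGetD_eq_getElem _ _ (by omega) (by push_cast; omega)]
    simpa using hc
  · rintro ⟨h0, hlen, hch⟩
    refine ⟨(j, c), ⟨⟨j.toNat, by omega, ?_⟩, by simp⟩, rfl⟩
    rw [pvCh, PySem.List.pyGetD_eq_getElem _ _ h0 hlen] at hch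
    rw [← hch]
    simp [Int.toNat_of_nonneg h0]

theorem pvCols_pairwise (b : List Char) (c : Char) :
    ((pvB2J b).getD c []).Pairwise (· < ·) := by
  rw [pvB2J_getD]
  rw [List.pairwise_map]
  exact (PySem.List.pairwise_lt_enumerate b 0).filter _

-- the inner j loop with continue/break equals a fold over the in-window indices
def pvIBody (j2len : PySem.Dict Int Int) (i : Int)
    (st : PySem.Dict Int Int × (Int × Int × Int)) (j : Int) :
    PySem.Dict Int Int × (Int × Int × Int) :=
  let k := j2len.getD (j - 1) 0 + 1
  (st.1.insert j k, if st.2.2.2 < k then (i - k + 1, j - k + 1, k) else st.2)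

theorem pvInnerJ_eq (blo bhi i : Int) (j2len : PySem.Dict Int Int) :
    ∀ (js : List Int), js.Pairwise (· < ·) →
    ∀ (new : PySem.Dict Int Int) (best : Int × Int × Int),
      pvInnerJ blo bhi i j2len js new best
      = (js.filter (fun j => decide (blo ≤ j) && decide (j < bhi))).foldl
          (pvIBody j2len i) (new, best) := by
  intro js
  induction js with
  | nil => intro _ new best; simp [pvInnerJ]
  | cons j js ih =>
    intro hpair new best
    by_cases hjlo : j < blo
    · rw [pvInnerJ, if_pos hjlo]
      rw [List.filter_cons_of_neg (by simp; omega)]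
      exact ih (List.Pairwise.of_cons hpair) new best
    · by_cases hjhi : bhi ≤ j
      · rw [pvInnerJ, if_neg hjlo, if_pos hjhi]
        rw [List.filter_cons_of_neg (by simp; omega)]
        rw [List.filter_eq_nil_iff.mpr]
        · rfl
        · intro x hx
          have := List.rel_of_pairwise_cons hpair hx
          simp
          omega
      · rw [pvInnerJ, if_neg hjlo, if_neg hjhi]
        rw [List.filter_cons_of_pos (by simp; omega)]
        rw [List.foldl_cons]
        exact ih (List.Pairwise.of_cons hpair) _ _

theorem pvIBody_best (j2len : PySem.Dict Int Int) (i : Int) :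
    ∀ (js : List Int) (new : PySem.Dict Int Int) (best : Int × Int × Int),
      (js.foldl (pvIBody j2len i) (new, best)).2
      = js.foldl (fun (best : Int × Int × Int) j =>
          let k := j2len.getD (j - 1) 0 + 1
          if best.2.2 < k then (i - k + 1, j - k + 1, k) else best) best := by
  intro js
  induction js with
  | nil => intro new best; rfl
  | cons j js ih =>
    intro new best
    simp only [List.foldl_cons]
    exact ih _ _

theorem pvIBody_dict (j2len : PySem.Dict Int Int) (i : Int) :
    ∀ (js : List Int) (new : PySem.Dict Int Int) (best : Int × Int × Int) (x : Int),
      (js.foldl (pvIBody j2len i) (new, best)).1.getD x 0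
      = if x ∈ js then j2len.getD (x - 1) 0 + 1 else new.getD x 0 := by
  intro js
  induction js with
  | nil => intro new best x; simp
  | cons j js ih =>
    intro new best x
    simp only [List.foldl_cons]
    rw [ih]
    by_cases hx : x ∈ js
    · rw [if_pos hx, if_pos (by simp [hx])]
    · rw [if_neg hx]
      show (new.insert j (j2len.getD (j - 1) 0 + 1)).getD x 0 = _
      rw [PySem.Dict.getD_insert]
      by_cases hxj : x = j
      · rw [if_pos hxj, if_pos (by simp [hxj]), hxj]
      · rw [if_neg hxj, if_neg (by simp [hxj, hx])]
-- best-so-far over processed cells P (chars already equal there), by difflib's update rule: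
-- strict improvement only, best stored in start form
def pvInvA (a b : List Char) (alo blo : Int) (P : Int → Int → Prop)
    (best : Int × Int × Int) : Prop :=
  (best = (alo, blo, 0) ∧ ∀ r c, ¬ P r c) ∨
  (∃ r c, P r c ∧
    best = (r - pvRE a b alo blo r c + 1, c - pvRE a b alo blo r c + 1, pvRE a b alo blo r c) ∧
    ∀ r' c', P r' c' →
      pvRE a b alo blo r' c' < pvRE a b alo blo r c ∨
      (pvRE a b alo blo r' c' = pvRE a b alo blo r c ∧ (r < r' ∨ (r = r' ∧ c ≤ c')))) ∧
  (∀ r c, P r c → pvCh a r = pvCh b c)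

theorem pvInvA_congr (a b : List Char) (alo blo : Int) (P Q : Int → Int → Prop)
    (best : Int × Int × Int) (h : ∀ r c, P r c ↔ Q r c)
    (hb : pvInvA a b alo blo P best) : pvInvA a b alo blo Q best := by
  rcases hb with ⟨he, hno⟩ | ⟨⟨r, c, hP, hbe, hall⟩, hch⟩
  · exact Or.inl ⟨he, fun r c hq => hno r c ((h r c).mpr hq)⟩
  · exact Or.inr ⟨⟨r, c, (h r c).mp hP, hbe,
      fun r' c' hq => hall r' c' ((h r' c').mpr hq)⟩,
      fun r c hq => hch r c ((h r c).mpr hq)⟩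

theorem pvInvA_step (a b : List Char) (alo blo : Int) (P : Int → Int → Prop)
    (best : Int × Int × Int) (r0 c0 : Int)
    (hbest : pvInvA a b alo blo P best)
    (hch : pvCh a r0 = pvCh b c0)
    (hord : ∀ r c, P r c → r < r0 ∨ (r = r0 ∧ c < c0)) :
    pvInvA a b alo blo (fun r c => P r c ∨ (r = r0 ∧ c = c0))
      (if best.2.2 < pvRE a b alo blo r0 c0 then
        (r0 - pvRE a b alo blo r0 c0 + 1, c0 - pvRE a b alo blo r0 c0 + 1,
          pvRE a b alo blo r0 c0)
       else best) := by
  have hpos := pvRE_pos a b alo blo r0 c0 hch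
  rcases hbest with ⟨he, hno⟩ | ⟨⟨r, c, hP, hbe, hall⟩, hchP⟩
  · rw [he, if_pos (by simp; omega)]
    refine Or.inr ⟨⟨r0, c0, Or.inr ⟨rfl, rfl⟩, rfl, ?_⟩, ?_⟩
    · rintro r' c' (hq | ⟨rfl, rfl⟩)
      · exact absurd hq (hno r' c')
      · exact Or.inr ⟨rfl, Or.inr ⟨rfl, le_rfl⟩⟩
    · rintro r' c' (hq | ⟨rfl, rfl⟩)
      · exact absurd hq (hno r' c')
      · exact hch
  · rw [hbe]
    dsimp only
    by_cases hup : pvRE a b alo blo r c < pvRE a b alo blo r0 c0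
    · rw [if_pos hup]
      refine Or.inr ⟨⟨r0, c0, Or.inr ⟨rfl, rfl⟩, rfl, ?_⟩, ?_⟩
      · rintro r' c' (hq | ⟨rfl, rfl⟩)
        · have := hall r' c' hq
          left; omega
        · exact Or.inr ⟨rfl, Or.inr ⟨rfl, le_rfl⟩⟩
      · rintro r' c' (hq | ⟨rfl, rfl⟩)
        · exact hchP r' c' hq
        · exact hch
    · rw [if_neg hup]
      refine Or.inr ⟨⟨r, c, Or.inl hP, rfl, ?_⟩, ?_⟩
      · rintro r' c' (hq | ⟨rfl, rfl⟩)
        · exact hall r' c' hq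
        · rcases lt_or_eq_of_le (not_lt.mp hup) with hlt | heq
          · exact Or.inl hlt
          · have := hord r c hP
            exact Or.inr ⟨heq, by omega⟩
      · rintro r' c' (hq | ⟨rfl, rfl⟩)
        · exact hchP r' c' hq
        · exact hch

-- a whole row of cells (ascending columns) preserves the invariant; the fold is the literal
-- best component of difflib's inner loop, values read from the previous row's j2len
theorem pvInvA_row (a b : List Char) (alo blo bhi : Int) (i : Int)
    (j2len : PySem.Dict Int Int)
    (hval : ∀ c : Int, blo ≤ c → c < bhi → pvCh a i = pvCh b c →
      j2len.getD (c - 1) 0 + 1 = pvRE a b alo blo i c) :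
    ∀ (cols : List Int), cols.Pairwise (· < ·) →
      (∀ c ∈ cols, blo ≤ c ∧ c < bhi) →
      (∀ c ∈ cols, pvCh a i = pvCh b c) →
    ∀ (P : Int → Int → Prop) (best : Int × Int × Int),
      pvInvA a b alo blo P best →
      (∀ r c, P r c → ∀ c0 ∈ cols, r < i ∨ (r = i ∧ c < c0)) →
      pvInvA a b alo blo (fun r c => P r c ∨ (r = i ∧ c ∈ cols))
        (cols.foldl (fun (best : Int × Int × Int) j =>
          let k := j2len.getD (j - 1) 0 + 1
          if best.2.2 < k then (i - k + 1, j - k + 1, k) else best) best) := by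
  intro cols
  induction cols with
  | nil =>
    intro _ _ _ P best hb _
    exact pvInvA_congr a b alo blo P _ best (by simp) hb
  | cons j js ih =>
    intro hpair hsub hcell P best hb hord
    simp only [List.foldl_cons]
    have hchj : pvCh a i = pvCh b j := hcell j (by simp)
    have hkj : j2len.getD (j - 1) 0 + 1 = pvRE a b alo blo i j :=
      hval j (hsub j (by simp)).1 (hsub j (by simp)).2 hchj
    have hstep := pvInvA_step a b alo blo P best i j hb hchj
      (fun r c hP => hord r c hP j (by simp))
    rw [hkj] at *
    have hrec := ih (List.Pairwise.of_cons hpair)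
      (fun c hc => hsub c (by simp [hc]))
      (fun c hc => hcell c (by simp [hc]))
      (fun r c => P r c ∨ (r = i ∧ c = j)) _ hstep ?_
    · refine pvInvA_congr a b alo blo _ _ _ ?_ hrec
      intro r c
      simp only [List.mem_cons]
      tauto
    · rintro r c (hP | ⟨rfl, rfl⟩) c0 hc0
      · exact hord r c hP c0 (by simp [hc0])
      · exact Or.inr ⟨rfl, List.rel_of_pairwise_cons hpair hc0⟩
-- the j2len invariant: after row iprev, the dict holds that row's in-window run-end values
def pvJA (a b : List Char) (alo blo bhi : Int) (iprev : Int) (d : PySem.Dict Int Int) : Prop :=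
  ∀ x : Int, d.getD x 0 =
    if alo ≤ iprev ∧ blo ≤ x ∧ x < bhi ∧ pvCh b x = pvCh a iprev
    then pvRE a b alo blo iprev x else 0

theorem pvJA_val (a b : List Char) (alo blo bhi : Int) (i : Int) (j2len : PySem.Dict Int Int)
    (hJ : pvJA a b alo blo bhi (i - 1) j2len) :
    ∀ c : Int, blo ≤ c → c < bhi → pvCh a i = pvCh b c →
      j2len.getD (c - 1) 0 + 1 = pvRE a b alo blo i c := by
  intro c hc1 hc2 hch
  rw [hJ (c - 1)]
  have hRE : pvRE a b alo blo i c
      = (if alo < i ∧ blo < c then pvRE a b alo blo (i - 1) (c - 1) else 0) + 1 := by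
    rw [pvRE, if_pos hch]
    by_cases hcnd : alo < i ∧ blo < c
    · rw [dif_pos hcnd, if_pos hcnd]
    · rw [dif_neg hcnd, if_neg hcnd]
  rw [hRE]
  by_cases hcnd : alo < i ∧ blo < c
  · rw [if_pos hcnd]
    by_cases hch2 : pvCh b (c - 1) = pvCh a (i - 1)
    · rw [if_pos ⟨by omega, by omega, by omega, hch2⟩]
    · rw [if_neg (by intro h; exact hch2 h.2.2.2)]
      rw [pvRE_eq_zero a b alo blo (i - 1) (c - 1) (fun h => hch2 h.symm)]
  · rw [if_neg hcnd, if_neg (by intro h; exact hcnd ⟨by omega, by omega⟩)]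

-- processed columns of row i: the in-window part of b2j[a[i]]
theorem pvFiltered_mem (a b : List Char) (blo bhi : Int) (i : Int)
    (hb0 : 0 ≤ blo) (hbl : bhi ≤ (b.length : Int)) (x : Int) :
    x ∈ ((pvB2J b).getD (pvCh a i) []).filter
        (fun j => decide (blo ≤ j) && decide (j < bhi))
      ↔ blo ≤ x ∧ x < bhi ∧ pvCh a i = pvCh b x := by
  rw [List.mem_filter]
  rw [pvCols_mem]
  constructor
  · rintro ⟨⟨h1, h2, h3⟩, h4⟩
    simp only [Bool.and_eq_true, decide_eq_true_eq] at h4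
    exact ⟨h4.1, h4.2, h3.symm⟩
  · rintro ⟨h1, h2, h3⟩
    exact ⟨⟨by omega, by omega, h3.symm⟩, by simp [h1, h2]⟩

-- one row of difflib's outer loop preserves both invariants
theorem pvFLM_step (a b : List Char) (alo _ahi blo bhi : Int) (i : Int)
    (hb0 : 0 ≤ blo) (hbl : bhi ≤ (b.length : Int))
    (hialo : alo ≤ i)
    (st : PySem.Dict Int Int × (Int × Int × Int))
    (hJ : pvJA a b alo blo bhi (i - 1) st.1)
    (hI : pvInvA a b alo blo
      (fun r c => alo ≤ r ∧ r < i ∧ blo ≤ c ∧ c < bhi ∧ pvCh a r = pvCh b c) st.2) :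
    pvJA a b alo blo bhi i
      (pvInnerJ blo bhi i st.1 ((pvB2J b).getD (PySem.List.pyGetD a i ' ') [])
        PySem.Dict.empty st.2).1 ∧
    pvInvA a b alo blo
      (fun r c => alo ≤ r ∧ r < i + 1 ∧ blo ≤ c ∧ c < bhi ∧ pvCh a r = pvCh b c)
      (pvInnerJ blo bhi i st.1 ((pvB2J b).getD (PySem.List.pyGetD a i ' ') [])
        PySem.Dict.empty st.2).2 := by
  have hcols : (PySem.List.pyGetD a i ' ') = pvCh a i := rfl
  rw [hcols]
  rw [pvInnerJ_eq blo bhi i st.1 _ (pvCols_pairwise b (pvCh a i)) PySem.Dict.empty st.2]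
  have hval := pvJA_val a b alo blo bhi i st.1 hJ
  constructor
  · intro x
    rw [pvIBody_dict]
    rw [PySem.Dict.getD_empty]
    by_cases hx : x ∈ ((pvB2J b).getD (pvCh a i) []).filter
        (fun j => decide (blo ≤ j) && decide (j < bhi))
    · have hm := (pvFiltered_mem a b blo bhi i hb0 hbl x).mp hx
      rw [if_pos hx, if_pos ⟨hialo, hm.1, hm.2.1, hm.2.2.symm⟩]
      exact hval x hm.1 hm.2.1 hm.2.2
    · rw [if_neg hx, if_neg]
      intro h
      exact hx ((pvFiltered_mem a b blo bhi i hb0 hbl x).mpr ⟨h.2.1, h.2.2.1, h.2.2.2.symm⟩)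
  · rw [pvIBody_best]
    have hrow := pvInvA_row a b alo blo bhi i st.1 hval
      (((pvB2J b).getD (pvCh a i) []).filter (fun j => decide (blo ≤ j) && decide (j < bhi)))
      ((pvCols_pairwise b (pvCh a i)).filter _)
      (fun c hc => by
        have := (pvFiltered_mem a b blo bhi i hb0 hbl c).mp hc
        exact ⟨this.1, this.2.1⟩)
      (fun c hc => ((pvFiltered_mem a b blo bhi i hb0 hbl c).mp hc).2.2)
      _ st.2 hI
      (fun r c hP c0 _ => Or.inl hP.2.1)
    refine pvInvA_congr a b alo blo _ _ _ ?_ hrow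
    intro r c
    rw [pvFiltered_mem a b blo bhi i hb0 hbl c]
    constructor
    · rintro (hP | ⟨rfl, h1, h2, h3⟩)
      · exact ⟨hP.1, by omega, hP.2.2.1, hP.2.2.2.1, hP.2.2.2.2⟩
      · exact ⟨hialo, by omega, h1, h2, h3⟩
    · rintro ⟨h1, h2, h3, h4, h5⟩
      by_cases hri : r = i
      · exact Or.inr ⟨hri, h3, h4, hri ▸ h5⟩
      · exact Or.inl ⟨h1, by omega, h3, h4, h5⟩

theorem pvFLM_loop (a b : List Char) (alo ahi blo bhi : Int)
    (hb0 : 0 ≤ blo) (hbl : bhi ≤ (b.length : Int)) :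
    ∀ (n : Nat) (lo : Int) (st : PySem.Dict Int Int × (Int × Int × Int)),
      ahi = lo + (n : Int) → alo ≤ lo →
      pvJA a b alo blo bhi (lo - 1) st.1 →
      pvInvA a b alo blo
        (fun r c => alo ≤ r ∧ r < lo ∧ blo ≤ c ∧ c < bhi ∧ pvCh a r = pvCh b c) st.2 →
      pvInvA a b alo blo
        (fun r c => alo ≤ r ∧ r < ahi ∧ blo ≤ c ∧ c < bhi ∧ pvCh a r = pvCh b c)
        (((PySem.List.pyRange lo ahi 1).foldl
            (fun (st : PySem.Dict Int Int × (Int × Int × Int)) i =>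
              pvInnerJ blo bhi i st.1 ((pvB2J b).getD (PySem.List.pyGetD a i ' ') [])
                PySem.Dict.empty st.2)
            st).2) := by
  intro n
  induction n with
  | zero =>
    intro lo st he _ _ hI
    rw [PySem.List.pyRange_one_eq_nil (by omega)]
    have : lo = ahi := by omega
    subst this
    exact hI
  | succ n ih =>
    intro lo st he hlo hJ hI
    rw [PySem.List.pyRange_one_cons (by omega)]
    simp only [List.foldl_cons]
    have hstep := pvFLM_step a b alo ahi blo bhi lo hb0 hbl hlo st hJ hI
    apply ih (lo + 1) _ (by omega) (by omega) ?_ hstep.2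
    have e : lo + 1 - 1 = lo := by ring
    rw [e]
    exact hstep.1

theorem pvInvA_to_isBest (a b : List Char) (alo ahi blo bhi : Int) (best : Int × Int × Int)
    (h : pvInvA a b alo blo
      (fun r c => alo ≤ r ∧ r < ahi ∧ blo ≤ c ∧ c < bhi ∧ pvCh a r = pvCh b c) best) :
    pvIsBest a b alo ahi blo bhi best := by
  have hGle : ∀ i j k : Int, pvGood a b alo ahi blo bhi i j k →
      k ≤ pvRE a b alo blo (i + k - 1) (j + k - 1) := by
    intro i j k hg
    obtain ⟨h1, h2, h3, h4, h5, hch⟩ := hg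
    have hcast : ((k - 1).toNat : Int) = k - 1 := by omega
    have := pvGood_le_re a b alo blo (k - 1).toNat i j h1 h2
      (fun t ht0 htn => hch t ht0 (by omega))
    rw [hcast] at this
    have e1 : i + (k - 1) = i + k - 1 := by ring
    have e2 : j + (k - 1) = j + k - 1 := by ring
    rw [e1, e2] at this
    omega
  rcases h with ⟨he, hno⟩ | ⟨⟨r, c, hP, hbe, hall⟩, hchP⟩
  · refine Or.inl ⟨he, ?_⟩
    intro i j k hg
    obtain ⟨h1, h2, h3, h4, h5, hchs⟩ := hg
    have hch0 := hchs 0 le_rfl (by omega)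
    simp only [add_zero] at hch0
    exact hno i j ⟨h1, by omega, h2, by omega, hch0⟩
  · obtain ⟨hr1, hr2, hc1, hc2, hch⟩ := hP
    have hspec := pvRE_spec a b alo blo (r - alo).toNat r c rfl hr1 hc1 hch
    have hpos := pvRE_pos a b alo blo r c hch
    refine Or.inr ⟨?_, ?_⟩
    · rw [hbe]
      refine ⟨hspec.1, hspec.2.1, by dsimp only; omega, by dsimp only; omega,
        by dsimp only; omega, ?_⟩
      intro t ht0 htv
      dsimp only at htv ⊢
      have := hspec.2.2 (pvRE a b alo blo r c - 1 - t) (by omega) (by omega)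
      have e1 : r - (pvRE a b alo blo r c - 1 - t) = r - pvRE a b alo blo r c + 1 + t := by ring
      have e2 : c - (pvRE a b alo blo r c - 1 - t) = c - pvRE a b alo blo r c + 1 + t := by ring
      rw [e1, e2] at this
      exact this
    · intro i j k hg
      have hk := hGle i j k hg
      obtain ⟨h1, h2, h3, h4, h5, hchs⟩ := hg
      have hcell : alo ≤ i + k - 1 ∧ i + k - 1 < ahi ∧ blo ≤ j + k - 1 ∧ j + k - 1 < bhi ∧
          pvCh a (i + k - 1) = pvCh b (j + k - 1) := by
        have := hchs (k - 1) (by omega) (by omega)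
        have e1 : i + (k - 1) = i + k - 1 := by ring
        have e2 : j + (k - 1) = j + k - 1 := by ring
        rw [e1, e2] at this
        exact ⟨by omega, by omega, by omega, by omega, this⟩
      have := hall (i + k - 1) (j + k - 1) hcell
      rw [hbe]
      dsimp only
      omega

-- with the best-match contract established, the two extension loops never fire
theorem pvExtLo_id (a b : List Char) (alo ahi blo bhi : Int) (best : Int × Int × Int)
    (h : pvIsBest a b alo ahi blo bhi best) :
    pvExtLo a b alo blo best.1 best.2.1 best.2.2 = best := by
  rw [pvExtLo]
  rw [dif_neg]
  rintro ⟨h1, h2, h3⟩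
  rcases h with ⟨he, hno⟩ | ⟨hg, hmax⟩
  · rw [he] at h1
    dsimp only at h1
    omega
  · obtain ⟨g1, g2, g3, g4, g5, gch⟩ := hg
    have hgood : pvGood a b alo ahi blo bhi (best.1 - 1) (best.2.1 - 1) (best.2.2 + 1) := by
      refine ⟨by omega, by omega, by omega, by omega, by omega, ?_⟩
      intro t ht0 htv
      rcases eq_or_lt_of_le ht0 with heq | hpos
      · simpa [← heq] using h3
      · have := gch (t - 1) (by omega) (by omega)
        have e1 : best.1 - 1 + t = best.1 + (t - 1) := by ring
        have e2 : best.2.1 - 1 + t = best.2.1 + (t - 1) := by ring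
        rw [e1, e2]
        exact this
    have := hmax _ _ _ hgood
    omega

theorem pvExtHi_id (a b : List Char) (alo ahi blo bhi : Int) (best : Int × Int × Int)
    (h : pvIsBest a b alo ahi blo bhi best) :
    pvExtHi a b ahi bhi best.1 best.2.1 best.2.2 = best := by
  rw [pvExtHi]
  rw [dif_neg]
  rintro ⟨h1, h2, h3⟩
  rcases h with ⟨he, hno⟩ | ⟨hg, hmax⟩
  · rw [he] at h1 h2 h3
    dsimp only at h1 h2 h3
    exact hno alo blo 1 ⟨le_rfl, le_rfl, by omega, by omega, le_rfl, by
      intro t ht0 htv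
      have : t = 0 := by omega
      subst this
      simpa using h3⟩
  · obtain ⟨g1, g2, g3, g4, g5, gch⟩ := hg
    have hgood : pvGood a b alo ahi blo bhi best.1 best.2.1 (best.2.2 + 1) := by
      refine ⟨g1, g2, by omega, by omega, by omega, ?_⟩
      intro t ht0 htv
      rcases lt_or_eq_of_le (show t ≤ best.2.2 by omega) with hlt | heq
      · exact gch t ht0 hlt
      · rw [heq]
        exact h3
    have := hmax _ _ _ hgood
    omega

theorem pvFLM_isBest (a b : List Char) (alo ahi blo bhi : Int)
    (hb0 : 0 ≤ blo) (hbl : bhi ≤ (b.length : Int)) :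
    pvIsBest a b alo ahi blo bhi (pvFLM a b (pvB2J b) alo ahi blo bhi) := by
  have hcore : pvIsBest a b alo ahi blo bhi
      (((PySem.List.pyRange alo ahi 1).foldl
        (fun (st : PySem.Dict Int Int × (Int × Int × Int)) i =>
          pvInnerJ blo bhi i st.1 ((pvB2J b).getD (PySem.List.pyGetD a i ' ') [])
            PySem.Dict.empty st.2)
        (PySem.Dict.empty, (alo, blo, 0))).2) := by
    by_cases hw : alo ≤ ahi
    · apply pvInvA_to_isBest
      apply pvFLM_loop a b alo ahi blo bhi hb0 hbl (ahi - alo).toNat alo _ (by omega) le_rfl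
      · intro x
        rw [PySem.Dict.getD_empty, if_neg (by omega)]
      · exact Or.inl ⟨rfl, fun r c hP => absurd hP (by omega)⟩
    · rw [PySem.List.pyRange_one_eq_nil (by omega)]
      refine Or.inl ⟨rfl, ?_⟩
      intro i j k hg
      obtain ⟨h1, h2, h3, h4, h5, _⟩ := hg
      omega
  show pvIsBest a b alo ahi blo bhi
    (pvExtHi a b ahi bhi _ _ _)
  rw [pvExtLo_id a b alo ahi blo bhi _ hcore]
  rw [pvExtHi_id a b alo ahi blo bhi _ hcore]
  exact hcore

-- the two longest-match engines agree on every window of a valid b-range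
theorem pvFLM_eq_bestMatch (a b : List Char) (alo ahi blo bhi : Int)
    (hb0 : 0 ≤ blo) (hbl : bhi ≤ (b.length : Int)) :
    pvFLM a b (pvB2J b) alo ahi blo bhi = pvBestMatch a b alo ahi blo bhi :=
  pvIsBest_unique a b alo ahi blo bhi _ _
    (pvFLM_isBest a b alo ahi blo bhi hb0 hbl)
    (pvBestMatch_isBest a b alo ahi blo bhi)
-- ---------- the divide-and-conquer block tree both loops traverse ----------

theorem pvBM_bounds (a b : List Char) (alo ahi blo bhi : Int)
    (h : (pvBestMatch a b alo ahi blo bhi).2.2 ≠ 0) :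
    alo ≤ (pvBestMatch a b alo ahi blo bhi).1 ∧
    (pvBestMatch a b alo ahi blo bhi).1 + (pvBestMatch a b alo ahi blo bhi).2.2 ≤ ahi ∧
    blo ≤ (pvBestMatch a b alo ahi blo bhi).2.1 ∧
    (pvBestMatch a b alo ahi blo bhi).2.1 + (pvBestMatch a b alo ahi blo bhi).2.2 ≤ bhi ∧
    1 ≤ (pvBestMatch a b alo ahi blo bhi).2.2 := by
  rcases pvBestMatch_isBest a b alo ahi blo bhi with ⟨he, _⟩ | ⟨hg, _⟩
  · rw [he] at h
    simp at h
  · exact ⟨hg.1, hg.2.2.1, hg.2.1, hg.2.2.2.1, hg.2.2.2.2.1⟩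

-- blocks in in-order (Source B's traversal): already sorted
def pvInT (a b : List Char) (alo ahi blo bhi : Int) : List (Int × Int × Int) :=
  if _h : (pvBestMatch a b alo ahi blo bhi).2.2 ≠ 0 then
    pvInT a b alo (pvBestMatch a b alo ahi blo bhi).1 blo (pvBestMatch a b alo ahi blo bhi).2.1
      ++ pvBestMatch a b alo ahi blo bhi ::
        pvInT a b ((pvBestMatch a b alo ahi blo bhi).1 + (pvBestMatch a b alo ahi blo bhi).2.2)
          ahi ((pvBestMatch a b alo ahi blo bhi).2.1 + (pvBestMatch a b alo ahi blo bhi).2.2) bhi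
  else []
termination_by ((ahi - alo).toNat + (bhi - blo).toNat)
decreasing_by
  · have := pvBM_bounds a b alo ahi blo bhi _h; omega
  · have := pvBM_bounds a b alo ahi blo bhi _h; omega

-- blocks in difflib's queue emission order (block first, then high part, then low part)
def pvPreT (a b : List Char) (alo ahi blo bhi : Int) : List (Int × Int × Int) :=
  if _h : (pvBestMatch a b alo ahi blo bhi).2.2 ≠ 0 then
    pvBestMatch a b alo ahi blo bhi ::
      pvPreT a b ((pvBestMatch a b alo ahi blo bhi).1 + (pvBestMatch a b alo ahi blo bhi).2.2)
        ahi ((pvBestMatch a b alo ahi blo bhi).2.1 + (pvBestMatch a b alo ahi blo bhi).2.2) bhi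
      ++ pvPreT a b alo (pvBestMatch a b alo ahi blo bhi).1 blo
          (pvBestMatch a b alo ahi blo bhi).2.1
  else []
termination_by ((ahi - alo).toNat + (bhi - blo).toNat)
decreasing_by
  · have := pvBM_bounds a b alo ahi blo bhi _h; omega
  · have := pvBM_bounds a b alo ahi blo bhi _h; omega

theorem pvPreT_nil_of_empty (a b : List Char) (alo ahi blo bhi : Int)
    (h : ahi ≤ alo ∨ bhi ≤ blo) : pvPreT a b alo ahi blo bhi = [] := by
  rw [pvPreT, dif_neg]
  intro hk
  have := pvBM_bounds a b alo ahi blo bhi hk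
  omega

theorem pvPreT_perm_inT (a b : List Char) (alo ahi blo bhi : Int) :
    (pvPreT a b alo ahi blo bhi).Perm (pvInT a b alo ahi blo bhi) := by
  fun_induction pvPreT a b alo ahi blo bhi with
  | case1 alo ahi blo bhi h ih1 ih2 =>
    rw [pvInT, dif_pos h]
    exact ((List.Perm.cons _ ih1).append ih2).trans List.perm_append_comm
  | case2 alo ahi blo bhi h =>
    rw [pvInT, dif_neg h]

theorem pvInT_blocks (a b : List Char) (alo ahi blo bhi : Int) :
    ∀ t ∈ pvInT a b alo ahi blo bhi,
      alo ≤ t.1 ∧ t.1 + t.2.2 ≤ ahi ∧ blo ≤ t.2.1 ∧ t.2.1 + t.2.2 ≤ bhi ∧ 1 ≤ t.2.2 := by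
  fun_induction pvInT a b alo ahi blo bhi with
  | case1 alo ahi blo bhi h ih1 ih2 =>
    intro t ht
    have hb := pvBM_bounds a b alo ahi blo bhi h
    simp only [List.mem_append, List.mem_cons] at ht
    rcases ht with h1 | h2 | h3
    · have := ih1 t h1; omega
    · rw [h2]; omega
    · have := ih2 t h3; omega
  | case2 alo ahi blo bhi h =>
    intro t ht
    simp at ht

theorem pvInT_pairwise (a b : List Char) (alo ahi blo bhi : Int) :
    (pvInT a b alo ahi blo bhi).Pairwise (fun s t => s.1 + s.2.2 ≤ t.1) := by
  fun_induction pvInT a b alo ahi blo bhi with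
  | case1 alo ahi blo bhi h ih1 ih2 =>
    have hb := pvBM_bounds a b alo ahi blo bhi h
    rw [List.pairwise_append]
    refine ⟨ih1, List.Pairwise.cons ?_ ih2, ?_⟩
    · intro t ht
      have := pvInT_blocks a b _ ahi _ bhi t ht
      omega
    · intro s hs t ht
      have hsb := pvInT_blocks a b alo _ blo _ s hs
      simp only [List.mem_cons] at ht
      rcases ht with rfl | ht
      · omega
      · have := pvInT_blocks a b _ ahi _ bhi t ht
        omega
  | case2 alo ahi blo bhi h =>
    exact List.Pairwise.nil

theorem pvInT_key_pairwise (a b : List Char) (alo ahi blo bhi : Int) :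
    (pvInT a b alo ahi blo bhi).Pairwise (fun s t => pvBlockKey s < pvBlockKey t) := by
  refine (pvInT_pairwise a b alo ahi blo bhi).imp_of_mem ?_
  intro s t hs ht hle
  have hsb := pvInT_blocks a b alo ahi blo bhi s hs
  unfold pvBlockKey
  rw [Prod.Lex.toLex_lt_toLex]
  left
  omega

-- difflib's sort of the queue-order blocks recovers exactly the in-order list
theorem pvSorted_raw (a b : List Char) (alo ahi blo bhi : Int) :
    PySem.List.sorted (pvPreT a b alo ahi blo bhi) pvBlockKey false
      = pvInT a b alo ahi blo bhi :=
  PySem.List.sorted_eq_of_perm_of_pairwise_lt _ _ _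
    (pvPreT_perm_inT a b alo ahi blo bhi).symm
    (pvInT_key_pairwise a b alo ahi blo bhi)
-- ---------- the two fueled loops compute their tree traversals ----------

def pvWWeight (w : Int × Int × Int × Int) : Nat :=
  3 * ((w.2.1 - w.1).toNat + (w.2.2.2 - w.2.2.1).toNat) + 1

theorem pvQueueLoop_eq (a b : List Char) :
    ∀ (fuel : Nat) (stack : List (Int × Int × Int × Int)) (acc : List (Int × Int × Int)),
      (∀ w ∈ stack, 0 ≤ w.2.2.1 ∧ w.2.2.2 ≤ (b.length : Int)) →
      (stack.map pvWWeight).sum ≤ fuel →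
      pvQueueLoop a b (pvB2J b) fuel stack acc
        = acc ++ stack.flatMap (fun w => pvPreT a b w.1 w.2.1 w.2.2.1 w.2.2.2) := by
  intro fuel
  induction fuel with
  | zero =>
    intro stack acc hval hfu
    match stack with
    | [] => simp [pvQueueLoop]
    | w :: rest =>
      exfalso
      simp only [List.map_cons, List.sum_cons, pvWWeight] at hfu
      omega
  | succ fuel ih =>
    intro stack acc hval hfu
    match stack with
    | [] => simp [pvQueueLoop]
    | ⟨alo, ahi, blo, bhi⟩ :: rest =>
      have hvw := hval _ (List.mem_cons_self ..)
      have hv1 : 0 ≤ blo := hvw.1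
      have hv2 : bhi ≤ (b.length : Int) := hvw.2
      have hrest_val : ∀ w ∈ rest, 0 ≤ w.2.2.1 ∧ w.2.2.2 ≤ (b.length : Int) :=
        fun w hw => hval w (List.mem_cons_of_mem _ hw)
      simp only [List.map_cons, List.sum_cons, pvWWeight] at hfu
      rw [pvQueueLoop]
      rw [pvFLM_eq_bestMatch a b alo ahi blo bhi hv1 hv2]
      rcases hbm : pvBestMatch a b alo ahi blo bhi with ⟨i0, j0, k0⟩
      simp only [List.flatMap_cons]
      rw [pvPreT]
      simp only [hbm]
      by_cases hk : k0 ≠ 0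
      · have hb := pvBM_bounds a b alo ahi blo bhi (by rw [hbm]; exact hk)
        rw [hbm] at hb
        simp only at hb
        rw [if_pos hk, dif_pos hk]
        by_cases hhi : i0 + k0 < ahi ∧ j0 + k0 < bhi
          <;> by_cases hlo : alo < i0 ∧ blo < j0
        · rw [if_pos hhi, if_pos hlo]
          simp only [List.cons_append, List.nil_append]
          rw [ih _ _ (by
              intro w hw
              simp only [List.mem_cons] at hw
              rcases hw with rfl | rfl | hw
              · exact ⟨show (0:Int) ≤ j0 + k0 by omega, hv2⟩
              · exact ⟨hv1, show j0 ≤ (b.length:Int) by omega⟩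
              · exact hrest_val w hw)
            (by
              simp only [List.map_cons, List.sum_cons, pvWWeight]
              omega)]
          simp [List.append_assoc]
        · rw [if_pos hhi, if_neg hlo]
          simp only [List.cons_append, List.nil_append]
          rw [ih _ _ (by
              intro w hw
              simp only [List.mem_cons] at hw
              rcases hw with rfl | hw
              · exact ⟨show (0:Int) ≤ j0 + k0 by omega, hv2⟩
              · exact hrest_val w hw)
            (by
              simp only [List.map_cons, List.sum_cons, pvWWeight]
              omega)]
          rw [pvPreT_nil_of_empty a b alo i0 blo j0 (by omega)]
          simp [List.append_assoc]
        · rw [if_neg hhi, if_pos hlo]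
          simp only [List.cons_append, List.nil_append]
          rw [ih _ _ (by
              intro w hw
              simp only [List.mem_cons] at hw
              rcases hw with rfl | hw
              · exact ⟨hv1, show j0 ≤ (b.length:Int) by omega⟩
              · exact hrest_val w hw)
            (by
              simp only [List.map_cons, List.sum_cons, pvWWeight]
              omega)]
          rw [pvPreT_nil_of_empty a b (i0 + k0) ahi (j0 + k0) bhi (by omega)]
          simp [List.append_assoc]
        · rw [if_neg hhi, if_neg hlo]
          simp only [List.nil_append]
          rw [ih _ _ hrest_val (by omega)]
          rw [pvPreT_nil_of_empty a b alo i0 blo j0 (by omega)]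
          rw [pvPreT_nil_of_empty a b (i0 + k0) ahi (j0 + k0) bhi (by omega)]
          simp [List.append_assoc]
      · rw [if_neg hk, dif_neg hk]
        rw [ih _ _ hrest_val (by omega)]
        simp

def pvIWeight : (Int × Int × Int) ⊕ (Int × Int × Int × Int) → Nat
  | Sum.inl _ => 1
  | Sum.inr w => pvWWeight w

theorem pvStackLoop_eq (a b : List Char) :
    ∀ (fuel : Nat) (stack : List ((Int × Int × Int) ⊕ (Int × Int × Int × Int)))
      (rev : List (Int × Int × Int)),
      (stack.map pvIWeight).sum ≤ fuel →
      pvStackLoop a b fuel stack rev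
        = (stack.flatMap (fun it =>
            match it with
            | Sum.inl t => [t]
            | Sum.inr w => pvInT a b w.1 w.2.1 w.2.2.1 w.2.2.2)).foldl pvCoalesce rev := by
  intro fuel
  induction fuel with
  | zero =>
    intro stack rev hfu
    match stack with
    | [] => simp [pvStackLoop]
    | Sum.inl t :: rest =>
      exfalso
      simp [pvIWeight] at hfu
    | Sum.inr w :: rest =>
      exfalso
      simp only [List.map_cons, List.sum_cons, pvIWeight, pvWWeight] at hfu
      omega
  | succ fuel ih =>
    intro stack rev hfu
    match stack with
    | [] => simp [pvStackLoop]
    | Sum.inl t :: rest =>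
      rw [pvStackLoop]
      simp only [List.map_cons, List.sum_cons, pvIWeight] at hfu
      rw [ih rest _ (by omega)]
      simp
    | Sum.inr ⟨alo, ahi, blo, bhi⟩ :: rest =>
      rw [pvStackLoop]
      simp only [List.map_cons, List.sum_cons, pvIWeight, pvWWeight] at hfu
      rcases hbm : pvBestMatch a b alo ahi blo bhi with ⟨i0, j0, k0⟩
      simp only [List.flatMap_cons]
      rw [pvInT]
      simp only [hbm]
      by_cases hk : k0 ≠ 0
      · have hb := pvBM_bounds a b alo ahi blo bhi (by rw [hbm]; exact hk)
        rw [hbm] at hb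
        simp only at hb
        rw [if_pos hk, dif_pos hk]
        rw [ih _ _ (by
          simp only [List.map_cons, List.sum_cons, pvIWeight, pvWWeight]
          omega)]
        simp only [List.flatMap_cons]
        simp [List.append_assoc]
      · rw [if_neg hk, dif_neg hk]
        rw [ih rest _ (by omega)]
        simp

-- ---------- inline coalescing = difflib's second merge pass ----------

theorem pvMerge_bridge_aux :
    ∀ (L : List (Int × Int × Int)) (i1 j1 k1 : Int) (tl : List (Int × Int × Int)),
      1 ≤ k1 → (∀ t ∈ L, 1 ≤ t.2.2) →
      (L.foldl pvCoalesce ((i1, j1, k1) :: tl)).reverse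
        = tl.reverse ++ pvMergeBlocks L i1 j1 k1 := by
  intro L
  induction L with
  | nil =>
    intro i1 j1 k1 tl hk _
    simp [pvMergeBlocks, show k1 ≠ 0 by omega]
  | cons t L ih =>
    intro i1 j1 k1 tl hk hL
    obtain ⟨i2, j2, k2⟩ := t
    simp only [List.foldl_cons]
    show (L.foldl pvCoalesce (pvCoalesce ((i1, j1, k1) :: tl) (i2, j2, k2))).reverse = _
    rw [pvCoalesce]
    by_cases hadj : i1 + k1 = i2 ∧ j1 + k1 = j2
    · rw [if_pos (by exact hadj)]
      rw [ih i1 j1 (k1 + k2) tl (by have := hL (i2, j2, k2) (by simp); dsimp only at this; omega)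
        (fun t ht => hL t (by simp [ht]))]
      rw [pvMergeBlocks, if_pos hadj]
    · rw [if_neg (by exact hadj)]
      rw [ih i2 j2 k2 ((i1, j1, k1) :: tl)
        (by have := hL (i2, j2, k2) (by simp); dsimp only at this; omega)
        (fun t ht => hL t (by simp [ht]))]
      rw [pvMergeBlocks, if_neg hadj]
      simp [show k1 ≠ 0 by omega]

theorem pvMerge_bridge (L : List (Int × Int × Int)) (hL : ∀ t ∈ L, 1 ≤ t.2.2) :
    (L.foldl pvCoalesce []).reverse = pvMergeBlocks L 0 0 0 := by
  match L with
  | [] => simp [pvMergeBlocks]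
  | (i2, j2, k2) :: L' =>
    simp only [List.foldl_cons]
    show (L'.foldl pvCoalesce (pvCoalesce [] (i2, j2, k2))).reverse = _
    rw [pvCoalesce]
    have hk2 : 1 ≤ k2 := by have := hL (i2, j2, k2) (by simp); dsimp only at this; omega
    rw [pvMerge_bridge_aux L' i2 j2 k2 [] hk2 (fun t ht => hL t (by simp [ht]))]
    rw [pvMergeBlocks]
    by_cases horig : (0 : Int) + 0 = i2 ∧ (0 : Int) + 0 = j2
    · rw [if_pos horig]
      obtain ⟨h1, h2⟩ := horig
      rw [← h1, ← h2]
      -- the initial running block (0,0,0) absorbs a block at the origin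
      have e : (0 : Int) + k2 = k2 := by ring
      rw [e]
      rfl
    · rw [if_neg horig]
      simp

-- ---------- the two op emissions agree on any block list ----------

theorem pvOpsA_append (o n : List Char) (x y : List (String × Int × Int × Int × Int)) :
    pvOpsA o n (x ++ y) = pvOpsA o n x ++ pvOpsA o n y := by
  induction x with
  | nil => simp [pvOpsA]
  | cons h t ih =>
    obtain ⟨op, i1, i2, j1, j2⟩ := h
    simp [pvOpsA, ih]

theorem pvOpsA_opcodes (o n : List Char) (bl : List (Int × Int × Int)) :
    ∀ (i j : Int), pvOpsA o n (pvOpcodes bl i j) = pvOpsB o n bl i j := by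
  induction bl with
  | nil => intro i j; simp [pvOpcodes, pvOpsA, pvOpsB]
  | cons h t ih =>
    intro i j
    obtain ⟨ai, bj, size⟩ := h
    simp only [pvOpcodes, pvOpsB, pvOpsA_append, ih]
    by_cases hi : i < ai <;> by_cases hj : j < bj <;>
      by_cases hs : size ≠ 0 <;> simp [pvOpsA, hi, hj, hs]

-- ---------- assembly: both programs compute the same block list, then the same ops ----------

theorem pvMB_eq (o n : List Char) :
    pvMatchingBlocks o n
      = (pvStackLoop o n (3 * (o.length + n.length) + 1)
          [Sum.inr (0, (o.length : Int), 0, (n.length : Int))] []).reverse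
        ++ [((o.length : Int), (n.length : Int), 0)] := by
  unfold pvMatchingBlocks
  dsimp only
  rw [pvQueueLoop_eq o n (3 * (o.length + n.length) + 1) _ []
    (by intro w hw; simp at hw; subst hw; simp)
    (by simp only [List.map_cons, List.map_nil, List.sum_cons, List.sum_nil]
        unfold pvWWeight
        dsimp only
        omega)]
  rw [pvStackLoop_eq o n _ _ []
    (by simp only [List.map_cons, List.map_nil, List.sum_cons, List.sum_nil]
        unfold pvIWeight pvWWeight
        dsimp only
        omega)]
  simp only [List.flatMap_cons, List.flatMap_nil, List.append_nil, List.nil_append]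
  rw [pvSorted_raw]
  rw [pvMerge_bridge _ (fun t ht => (pvInT_blocks o n 0 _ 0 _ t ht).2.2.2.2)]

theorem pvMain (old_text new_text : String) :
    compute_diff_ops_py old_text new_text = compute_diff_ops_py_alt old_text new_text := by
  unfold compute_diff_ops_py compute_diff_ops_py_alt
  dsimp only
  rw [pvMB_eq old_text.toList new_text.toList]
  exact pvOpsA_opcodes old_text.toList new_text.toList _ 0 0

-- ===== VERDICT (by name: the statement is the Claim_ definition above) =====
theorem compute_diff_ops_py_spec : Claim_equal_compute_diff_ops_py := by
  intro old_text new_text _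
  unfold Spec_compute_diff_ops_py
  exact pvMain old_text new_text
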